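-- pv_equiv track=rewrite | github.com/lepetitprinz/coding-challenge-auto-push | 백준/Silver/4659. 비밀번호 발음하기/비밀번호 발음하기.py | check_seq_2
-- ===== SOURCE A (Python) =====
-- def check_seq_2(word):
--     flag = True
--     temp = word[0]
--     for w in word[1:]:
--         if w == temp[-1]:
--             if w == 'e' or w == 'o':
--                 continue
--             else:
--                 flag = False
--                 break
--         else:
--             temp = w
--
--     return flag
-- ===== SOURCE B (Python) =====
-- def check_seq_2(word):
--     i, n = 0, len(word)
--     while i < n:
--         j = i + 1
--         while j < n and word[j] == word[i]:
--             j += 1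
--         if j - i >= 2 and word[i] != 'e' and word[i] != 'o':
--             return False
--         i = j
--     return True
-- ===== Notes on version B (the rewrite author's own statement) =====
-- stated objective: alternative
-- what changed: B collapses the word into maximal runs of equal characters with a two-index scan and rejects any run of length at least 2 whose letter is not an allowed doubling vowel, instead of A's pairwise adjacent comparison with a temp/flag accumulator; Pre_ excludes the empty string, on which A raises IndexError.
import Mathlib
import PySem

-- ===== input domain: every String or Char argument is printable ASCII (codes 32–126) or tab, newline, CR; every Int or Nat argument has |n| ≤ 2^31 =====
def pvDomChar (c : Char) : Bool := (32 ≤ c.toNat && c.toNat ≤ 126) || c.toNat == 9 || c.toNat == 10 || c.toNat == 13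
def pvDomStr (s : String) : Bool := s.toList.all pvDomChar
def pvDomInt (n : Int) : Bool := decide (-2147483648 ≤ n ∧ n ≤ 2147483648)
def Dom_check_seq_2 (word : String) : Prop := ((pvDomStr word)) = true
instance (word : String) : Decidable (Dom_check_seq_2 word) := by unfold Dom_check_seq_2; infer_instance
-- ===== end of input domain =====

-- B replaces A's pairwise adjacent-character comparison (temp/flag accumulator) by a
-- scan over maximal runs of equal characters; same O(n) cost, different decomposition.
-- Pre_ excludes the empty string, on which A raises IndexError while B returns true.


-- ===== PORT A =====
-- A's for-loop over word[1:] with state (flag, temp); temp is always a single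
-- character here, so temp[-1] is that character; 'break' with flag=False is 'false'.
def checkLoopA : List Char → Char → Bool
  | [], _ => true
  | w :: rest, temp =>
    if w == temp then
      if w == 'e' || w == 'o' then checkLoopA rest temp
      else false
    else checkLoopA rest w

def check_seq_2 (word : String) : Bool :=
  match PySem.List.pyGet? word.toList 0 with  -- temp = word[0]; none = IndexError (excluded by Pre_)
  | none => false
  | some temp => checkLoopA (PySem.List.slice word.toList (some 1) none) temp

-- ===== PORT B =====
-- B's outer while-loop: each step consumes one maximal run c :: (rest.takeWhile (== c)).
def checkLoopB : List Char → Bool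
  | [] => true
  | c :: rest =>
    if (rest.takeWhile (· == c)).length + 1 ≥ 2 ∧ c ≠ 'e' ∧ c ≠ 'o' then false
    else checkLoopB (rest.dropWhile (· == c))
termination_by l => l.length
decreasing_by simp; exact rest.length_dropWhile_le _

def check_seq_2_alt (word : String) : Bool :=
  checkLoopB word.toList

-- ===== PRECONDITION & SPEC =====
-- Pre_ excludes exactly the empty string, on which A raises IndexError (word[0]).
def Pre_check_seq_2 (word : String) : Prop := word ≠ ""
instance (word : String) : Decidable (Pre_check_seq_2 word) := by unfold Pre_check_seq_2; infer_instance
def pvWitness_check_seq_2 : String := "hello"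

def Spec_check_seq_2 (word : String) (out : Bool) : Prop := out = check_seq_2_alt word
instance (word : String) (out : Bool) : Decidable (Spec_check_seq_2 word out) := by unfold Spec_check_seq_2; infer_instance

-- ===== CLAIM (what is proved, stated in full; the proofs are below) =====
def Claim_equal_check_seq_2 : Prop := ∀ (word : String), Dom_check_seq_2 word → Pre_check_seq_2 word → Spec_check_seq_2 word (check_seq_2 word)

-- ===== LEMMAS AND PROOFS =====

-- Skipping one extra copy of an allowed letter at the head does not change B.
theorem checkLoopB_eo (c : Char) (cs : List Char) (h : c = 'e' ∨ c = 'o') :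
    checkLoopB (c :: cs) = checkLoopB (cs.dropWhile (· == c)) := by
  rw [checkLoopB.eq_def]
  rcases h with h | h <;> subst h <;> simp

theorem checkLoopA_eq_checkLoopB (cs : List Char) (c : Char) :
    checkLoopA cs c = checkLoopB (c :: cs) := by
  induction cs generalizing c with
  | nil => rw [checkLoopB.eq_def]; simp [checkLoopA, checkLoopB]
  | cons w rest ih =>
    by_cases hwc : w = c
    · subst hwc
      by_cases heo : w = 'e' ∨ w = 'o'
      · rw [checkLoopA]
        simp only [beq_self_eq_true, if_true]
        have hcond : (w == 'e' || w == 'o') = true := by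
          rcases heo with h | h <;> simp [h]
        rw [hcond, if_pos rfl, ih]
        rw [checkLoopB_eo w rest heo, checkLoopB_eo w (w :: rest) heo]
        simp
      · push Not at heo
        rw [checkLoopA, checkLoopB.eq_def]
        have : (w == 'e' || w == 'o') = false := by
          simp [heo.1, heo.2]
        simp [this, heo.1, heo.2]
    · rw [checkLoopA, checkLoopB.eq_def]
      have hne : (w == c) = false := by simp [hwc]
      simp [hne, List.takeWhile, List.dropWhile, ih]

theorem check_seq_2_spec_aux (word : String) (h : word ≠ "") :
    check_seq_2 word = check_seq_2_alt word := by
  unfold check_seq_2 check_seq_2_alt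
  have hl : word.toList ≠ [] := by simpa using h
  obtain ⟨c, cs, hcc⟩ := List.exists_cons_of_ne_nil hl
  rw [hcc]
  simp [PySem.List.slice_from_one, checkLoopA_eq_checkLoopB]

-- ===== VERDICT (by name: the statement is the Claim_ definition above) =====
theorem check_seq_2_spec : Claim_equal_check_seq_2 := by
  intro word _ hpre
  exact check_seq_2_spec_aux word hpre
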